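-- pv_equiv track=rewrite | github.com/farkaskid/dump | superior-substring.py | checkSuperior
-- ===== SOURCE A (Python) =====
-- def findMax(fmap):
--     highest = -1
--
--     for k, v in fmap.items():
--         if v > highest:
--             highest = v
--
--     return highest
--
-- def checkSuperior(s, start, end, fmap):
--     if (end - start + 1) // 2 <= findMax(fmap):
--         return end - start + 1
--     else:
--         if fmap[s[end]] < fmap[s[start]]:
--             fmap[s[end]] -= 1
--             return checkSuperior(s, start, end - 1, fmap)
--         else:
--             fmap[s[start]] -= 1
--             return checkSuperior(s, start + 1, end, fmap)
-- ===== SOURCE B (Python) =====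
-- def checkSuperior(s, start, end, fmap):
--     # Iterative version: the max frequency is maintained incrementally with a
--     # count-of-values bucket table instead of being recomputed by a full scan of
--     # fmap at every shrink step.  Mutates fmap exactly like the original (the
--     # same sequence of decrements).
--     m = None
--     for v in fmap.values():
--         if m is None or v > m:
--             m = v
--     cnt = {}
--     for v in fmap.values():
--         cnt[v] = cnt.get(v, 0) + 1
--     while True:
--         cur = -1 if m is None else (m if m > -1 else -1)
--         if (end - start + 1) // 2 <= cur:
--             return end - start + 1
--         ce = s[end]
--         ve = fmap[ce]
--         cs = s[start]
--         vs = fmap[cs]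
--         if ve < vs:
--             c, v = ce, ve
--             end -= 1
--         else:
--             c, v = cs, vs
--             start += 1
--         fmap[c] = v - 1
--         cnt[v] -= 1
--         cnt[v - 1] = cnt.get(v - 1, 0) + 1
--         if v == m and cnt[v] == 0:
--             m = v - 1
-- ===== Notes on version B (the rewrite author's own statement) =====
-- stated objective: alternative
-- what changed: Replaces A's recursion that rescans the whole fmap with findMax at every shrink step by an iterative loop that computes the maximum once and then maintains it across decrements with a count-of-values bucket table; it trades A's per-step rescan for extra setup and per-step bookkeeping, which a timing run did not measure as faster on the generated inputs.
-- outside the precondition, e.g. on checkSuperior('ab', 0, -1, {'a': -1, 'b': -1}): A returns -1, B returns -1; on checkSuperior('ab', 1, 0, {'a': -1, 'b': -1}): A returns -1, B returns -1; on checkSuperior('abcd', 0, 3, {'a': 1, 'c': 0, 'd': 0}): A returns 3, B returns 3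
import Mathlib
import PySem

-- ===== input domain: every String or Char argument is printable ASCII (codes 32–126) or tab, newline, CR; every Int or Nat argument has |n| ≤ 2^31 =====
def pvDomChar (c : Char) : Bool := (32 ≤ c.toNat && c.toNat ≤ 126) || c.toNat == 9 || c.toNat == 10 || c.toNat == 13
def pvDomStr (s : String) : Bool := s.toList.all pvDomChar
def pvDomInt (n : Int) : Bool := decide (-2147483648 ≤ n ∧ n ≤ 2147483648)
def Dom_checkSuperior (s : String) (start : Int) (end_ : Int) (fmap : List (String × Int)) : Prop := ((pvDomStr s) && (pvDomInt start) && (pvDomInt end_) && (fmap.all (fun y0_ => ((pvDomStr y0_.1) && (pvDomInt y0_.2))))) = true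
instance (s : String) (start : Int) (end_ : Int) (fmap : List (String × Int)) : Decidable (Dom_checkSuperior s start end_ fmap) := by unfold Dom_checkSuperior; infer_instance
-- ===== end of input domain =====

-- B replaces A's recursion, which rescans all of fmap with findMax at every shrink step,
-- by an iterative loop that computes the maximum once and maintains it across decrements
-- with a count-of-values bucket table (objective: alternative).  Both A and B mutate the
-- Python dict `fmap` identically (the same sequence of decrements); the theorems below are
-- about the return value.

-- ===== PORT A =====
def pvFindMax (fmap : PySem.Dict String Int) : Int :=
  fmap.items.foldl (fun highest kv => if kv.2 > highest then kv.2 else highest) (-1)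

-- fuel counts loop iterations; (end_-start+3).toNat+1 is always enough for the guard to fire
def pvGoA : Nat → String → Int → Int → PySem.Dict String Int → Int
  | 0, _, _, _, _ => 0
  | fuel+1, s, start, end_, fmap =>
    if PySem.Int.floordiv (end_ - start + 1) 2 ≤ pvFindMax fmap then
      end_ - start + 1
    else
      match PySem.Str.pyGet? s end_ with
      | none => 0      -- IndexError: outside Pre_
      | some ce =>
        match fmap.get? (String.ofList [ce]) with
        | none => 0    -- KeyError: outside Pre_
        | some ve =>
          match PySem.Str.pyGet? s start with
          | none => 0
          | some cs =>
            match fmap.get? (String.ofList [cs]) with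
            | none => 0
            | some vs =>
              if ve < vs then
                pvGoA fuel s start (end_ - 1) (fmap.insert (String.ofList [ce]) (ve - 1))
              else
                pvGoA fuel s (start + 1) end_ (fmap.insert (String.ofList [cs]) (vs - 1))

def checkSuperior (s : String) (start : Int) (end_ : Int) (fmap : List (String × Int)) : Int :=
  pvGoA ((end_ - start + 3).toNat + 1) s start end_ (PySem.Dict.mk fmap)

-- ===== PORT B =====
-- cur = -1 if m is None else max(m, -1)
def pvClamp (m : Option Int) : Int :=
  match m with | none => -1 | some x => if x > -1 then x else -1

def pvInitMax (fmap : PySem.Dict String Int) : Option Int :=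
  fmap.values.foldl
    (fun m v => match m with | none => some v | some x => if v > x then some v else some x) none

def pvInitCnt (fmap : PySem.Dict String Int) : PySem.Dict Int Int :=
  fmap.values.foldl (fun cnt v => cnt.insert v (cnt.getD v 0 + 1)) PySem.Dict.empty

def pvGoB : Nat → String → Int → Int → PySem.Dict String Int → Option Int → PySem.Dict Int Int → Int
  | 0, _, _, _, _, _, _ => 0
  | fuel+1, s, start, end_, fmap, m, cnt =>
    if PySem.Int.floordiv (end_ - start + 1) 2 ≤ pvClamp m then
      end_ - start + 1
    else
      match PySem.Str.pyGet? s end_ with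
      | none => 0
      | some ce =>
        match fmap.get? (String.ofList [ce]) with
        | none => 0
        | some ve =>
          match PySem.Str.pyGet? s start with
          | none => 0
          | some cs =>
            match fmap.get? (String.ofList [cs]) with
            | none => 0
            | some vs =>
              let cvse : String × Int × Int × Int :=
                if ve < vs then (String.ofList [ce], ve, start, end_ - 1)
                else (String.ofList [cs], vs, start + 1, end_)
              let c := cvse.1
              let v := cvse.2.1
              let start' := cvse.2.2.1
              let end' := cvse.2.2.2
              let fmap' := fmap.insert c (v - 1)
              -- `cnt[v] -= 1`: v is a current value of fmap, hence always a key of cnt, so modify is exact here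
              let cnt1 := cnt.modify v 0 (· - 1)
              let cnt' := cnt1.insert (v - 1) (cnt1.getD (v - 1) 0 + 1)
              let m' : Option Int := if m = some v ∧ cnt'.getD v 0 = 0 then some (v - 1) else m
              pvGoB fuel s start' end' fmap' m' cnt'

def checkSuperior_alt (s : String) (start : Int) (end_ : Int) (fmap : List (String × Int)) : Int :=
  let d := PySem.Dict.mk fmap
  pvGoB ((end_ - start + 3).toNat + 1) s start end_ d (pvInitMax d) (pvInitCnt d)

-- ===== PRECONDITION & SPEC =====
-- Pre_ excludes (a) association lists with duplicate keys (no Python dict produces them) and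
-- (b) calls that neither return immediately nor carry a valid in-string window whose
-- characters all have fmap entries and some entry large enough to keep the shrink inside the
-- string: on the excluded calls A's trajectory can raise IndexError/KeyError, and the
-- excluded inputs on which A still returns (via a negative-index wraparound access, or
-- because the failing access is never reached) are a closed-form over-approximation on which
-- the Python B matches A anyway.
def Pre_checkSuperior (s : String) (start : Int) (end_ : Int) (fmap : List (String × Int)) : Prop :=
  (fmap.map Prod.fst).Nodup ∧
  (PySem.Int.floordiv (end_ - start + 1) 2 ≤ fmap.foldl (fun h kv => if kv.2 > h then kv.2 else h) (-1)
   ∨ (0 ≤ start ∧ start ≤ end_ ∧ end_ < (s.toList.length : Int) ∧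
      (∀ c ∈ (s.toList.take (end_ + 1).toNat).drop start.toNat, String.ofList [c] ∈ fmap.map Prod.fst) ∧
      (∃ kv ∈ fmap, (((s.toList.take (end_ + 1).toNat).drop start.toNat).filter
          (fun c => String.ofList [c] == kv.1)).length ≤ kv.2)))

instance (s : String) (start : Int) (end_ : Int) (fmap : List (String × Int)) : Decidable (Pre_checkSuperior s start end_ fmap) := by unfold Pre_checkSuperior; infer_instance

def pvWitness_checkSuperior : String × Int × Int × (List (String × Int)) := ("ab", 0, 1, [("a", 1), ("b", 1)])

def Spec_checkSuperior (s : String) (start : Int) (end_ : Int) (fmap : List (String × Int)) (out : Int) : Prop := out = checkSuperior_alt s start end_ fmap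
instance (s : String) (start : Int) (end_ : Int) (fmap : List (String × Int)) (out : Int) : Decidable (Spec_checkSuperior s start end_ fmap out) := by unfold Spec_checkSuperior; infer_instance

-- ===== CLAIM (what is proved, stated in full; the proofs are below) =====
def Claim_equal_checkSuperior : Prop := ∀ (s : String) (start : Int) (end_ : Int) (fmap : List (String × Int)), Dom_checkSuperior s start end_ fmap → Pre_checkSuperior s start end_ fmap → Spec_checkSuperior s start end_ fmap (checkSuperior s start end_ fmap)

-- ===== LEMMAS AND PROOFS =====

-- B's loop state is correct for a dict d when m is the maximum of d's values (none iff empty)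
def pvIsMax (V : List Int) (m : Option Int) : Prop :=
  match m with
  | none => V = []
  | some x => x ∈ V ∧ ∀ y ∈ V, y ≤ x

def pvCntOk (V : List Int) (cnt : PySem.Dict Int Int) : Prop :=
  ∀ w : Int, cnt.getD w 0 = (V.count w : Int)

lemma pv_foldl_max_le (t : List Int) : ∀ a : Int, (∀ y ∈ t, y ≤ a) →
    t.foldl (fun h v => if v > h then v else h) a = a := by
  induction t with
  | nil => intro a _; rfl
  | cons v t ih =>
    intro a hb
    have hv : v ≤ a := hb v (by simp)
    simp only [List.foldl_cons]
    rw [if_neg (by omega)]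
    exact ih a (fun y hy => hb y (by simp [hy]))

lemma pv_foldl_max_eq (V : List Int) : ∀ (a x : Int), x ∈ V → (∀ y ∈ V, y ≤ x) →
    V.foldl (fun h v => if v > h then v else h) a = if x > a then x else a := by
  induction V with
  | nil => intro a x hx; exact absurd hx (by simp)
  | cons v t ih =>
    intro a x hx hb
    have hv : v ≤ x := hb v (by simp)
    simp only [List.foldl_cons]
    by_cases ht : x ∈ t
    · have := ih (if v > a then v else a) x ht (fun y hy => hb y (by simp [hy]))
      rw [this]
      split_ifs <;> omega
    · have hxv : x = v := by
        rcases List.mem_cons.mp hx with h | h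
        · exact h
        · exact absurd h ht
      subst hxv
      rw [pv_foldl_max_le t (if x > a then x else a)
        (fun y hy => by have := hb y (by simp [hy]); split_ifs <;> omega)]

lemma pv_initMax_go (V : List Int) : ∀ (V0 : List Int) (m : Option Int), pvIsMax V0 m →
    pvIsMax (V0 ++ V)
      (V.foldl (fun m v => match m with | none => some v | some x => if v > x then some v else some x) m) := by
  induction V with
  | nil => intro V0 m h; simpa using h
  | cons v t ih =>
    intro V0 m h
    simp only [List.foldl_cons]
    cases m with
    | none =>
      simp only [pvIsMax] at h
      subst h
      have step : pvIsMax ([v] : List Int) (some v) := by simp [pvIsMax]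
      exact ih [v] (some v) step
    | some x =>
      obtain ⟨hx, hb⟩ := h
      have step : pvIsMax (V0 ++ [v]) (if v > x then some v else some x) := by
        by_cases hvx : v > x
        · rw [if_pos hvx]
          constructor
          · simp
          · intro y hy
            rcases List.mem_append.mp hy with h' | h'
            · have := hb y h'; omega
            · simp at h'; omega
        · rw [if_neg hvx]
          constructor
          · exact List.mem_append.mpr (Or.inl hx)
          · intro y hy
            rcases List.mem_append.mp hy with h' | h'
            · exact hb y h'
            · simp at h'; omega
      have h2 := ih (V0 ++ [v]) _ step
      rw [List.append_assoc] at h2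
      exact h2

lemma pv_initMax_spec (d : PySem.Dict String Int) : pvIsMax d.values (pvInitMax d) := by
  have := pv_initMax_go d.values [] none (by simp [pvIsMax])
  simpa [pvInitMax] using this

lemma pv_initCnt_spec (d : PySem.Dict String Int) : pvCntOk d.values (pvInitCnt d) := by
  intro w
  unfold pvInitCnt
  rw [PySem.Dict.foldl_insert_getD_add_one_eq_counter]
  exact PySem.Dict.getD_counter d.values w

-- a successful lookup splits the dict around its (unique) entry for k, and insert rewrites just that entry
lemma pv_get_decomp (d : PySem.Dict String Int) (k : String) (v : Int)
    (hnd : d.keys.Nodup) (h : d.get? k = some v) :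
    ∃ l1 l2, d.items = l1 ++ (k, v) :: l2 ∧
      d.keys = l1.map Prod.fst ++ k :: l2.map Prod.fst ∧
      ∀ w : Int, (d.insert k w).items = l1 ++ (k, w) :: l2 := by
  have hmem : (k, v) ∈ d.items := PySem.Dict.mem_items_of_get?_eq_some d h
  obtain ⟨l1, l2, hsplit⟩ := List.append_of_mem hmem
  have hkeys : d.keys = l1.map Prod.fst ++ k :: l2.map Prod.fst := by
    simp [PySem.Dict.keys, hsplit]
  refine ⟨l1, l2, hsplit, hkeys, ?_⟩
  intro w
  have hnd' := hnd
  rw [hkeys] at hnd'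
  have hnd'' := List.nodup_append.mp hnd'
  have hnotin1 : k ∉ l1.map Prod.fst := fun hk => hnd''.2.2 k hk k (by simp) rfl
  have hnotin2 : k ∉ l2.map Prod.fst := (List.nodup_cons.mp hnd''.2.1).1
  have hk1 : ∀ p ∈ l1, p.1 ≠ k := fun p hp hpk => hnotin1 (List.mem_map.mpr ⟨p, hp, hpk⟩)
  have hk2 : ∀ p ∈ l2, p.1 ≠ k := fun p hp hpk => hnotin2 (List.mem_map.mpr ⟨p, hp, hpk⟩)
  have hcont : d.contains k = true := by
    rw [PySem.Dict.contains_eq_isSome_get?, h]; rfl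
  rw [PySem.Dict.items_insert_of_contains d w hcont, hsplit]
  rw [List.map_append, List.map_cons]
  congr 1
  · exact (List.map_congr_left (fun p hp => by simp [hk1 p hp])).trans (List.map_id _)
  · congr 1
    · simp
    · exact (List.map_congr_left (fun p hp => by simp [hk2 p hp])).trans (List.map_id _)

-- one decrement step preserves B's invariants
lemma pv_step_inv (d : PySem.Dict String Int) (k : String) (v : Int) (m : Option Int)
    (cnt : PySem.Dict Int Int)
    (hnd : d.keys.Nodup) (hm : pvIsMax d.values m) (hc : pvCntOk d.values cnt)
    (hget : d.get? k = some v) :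
    (d.insert k (v - 1)).keys.Nodup ∧
    pvCntOk (d.insert k (v - 1)).values
      ((cnt.modify v 0 (· - 1)).insert (v - 1) ((cnt.modify v 0 (· - 1)).getD (v - 1) 0 + 1)) ∧
    pvIsMax (d.insert k (v - 1)).values
      (if m = some v ∧
          ((cnt.modify v 0 (· - 1)).insert (v - 1)
            ((cnt.modify v 0 (· - 1)).getD (v - 1) 0 + 1)).getD v 0 = 0
       then some (v - 1) else m) := by
  obtain ⟨l1, l2, hitems, hkeys, hins⟩ := pv_get_decomp d k v hnd hget
  have hV : d.values = l1.map Prod.snd ++ v :: l2.map Prod.snd := by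
    simp [PySem.Dict.values, hitems]
  have hV' : (d.insert k (v - 1)).values = l1.map Prod.snd ++ (v - 1) :: l2.map Prod.snd := by
    simp [PySem.Dict.values, hins (v - 1)]
  have hK' : (d.insert k (v - 1)).keys = d.keys := by
    simp [PySem.Dict.keys, hins (v - 1), hitems]
  constructor
  · rw [hK']; exact hnd
  have hcnt' : pvCntOk (d.insert k (v - 1)).values
      ((cnt.modify v 0 (· - 1)).insert (v - 1) ((cnt.modify v 0 (· - 1)).getD (v - 1) 0 + 1)) := by
    intro w
    have h1 := hc v
    have h2 := hc w
    have h3 := hc (v - 1)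
    rw [hV] at h1 h2 h3
    rw [hV']
    simp only [PySem.Dict.getD_insert, PySem.Dict.getD_modify,
      List.count_append, List.count_cons, beq_iff_eq] at h1 h2 h3 ⊢
    by_cases hw1 : w = v - 1
    · subst hw1
      rw [if_pos rfl, if_neg (show ¬ (v - 1 : Int) = v from by omega), if_pos rfl]
      rw [if_neg (show ¬ (v : Int) = v - 1 from by omega)] at h3
      omega
    · rw [if_neg hw1]
      by_cases hw2 : w = v
      · rw [if_pos hw2, hw2, if_neg (show ¬ (v - 1 : Int) = v from by omega)]
        simp only [if_true] at h1
        omega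
      · rw [if_neg hw2, if_neg (show ¬ (v - 1 : Int) = w from fun hh => hw1 hh.symm)]
        rw [if_neg (show ¬ v = w from fun hh => hw2 hh.symm)] at h2
        omega
  refine ⟨hcnt', ?_⟩
  have hvmem : v ∈ d.values := by rw [hV]; simp
  cases m with
  | none => simp [pvIsMax] at hm; rw [hm] at hvmem; simp at hvmem
  | some x =>
    obtain ⟨hx, hb⟩ := hm
    have hvx : v ≤ x := hb v hvmem
    have hcv := hcnt' v
    rw [hV'] at hcv
    by_cases hcond : (some x : Option Int) = some v ∧
        ((cnt.modify v 0 (· - 1)).insert (v - 1)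
          ((cnt.modify v 0 (· - 1)).getD (v - 1) 0 + 1)).getD v 0 = 0
    · rw [if_pos hcond]
      obtain ⟨hxv, hzero⟩ := hcond
      have hxv' : x = v := by injection hxv
      subst hxv'
      have hnotin : x ∉ l1.map Prod.snd ++ l2.map Prod.snd := by
        intro hmem
        rw [hzero] at hcv
        have : (l1.map Prod.snd ++ (x - 1) :: l2.map Prod.snd).count x = 0 := by exact_mod_cast hcv.symm
        rw [List.count_eq_zero] at this
        apply this
        rcases List.mem_append.mp hmem with h' | h' <;> simp [h']
      constructor
      · rw [hV']; simp
      · intro y hy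
        rw [hV'] at hy
        rcases List.mem_append.mp hy with h' | h'
        · have hyx : y ≤ x := hb y (by rw [hV]; exact List.mem_append.mpr (Or.inl h'))
          have hyne : y ≠ x := fun he => hnotin (List.mem_append.mpr (Or.inl (he ▸ h')))
          omega
        · rcases List.mem_cons.mp h' with h'' | h''
          · omega
          · have hyx : y ≤ x := hb y (by rw [hV]; exact List.mem_append.mpr (Or.inr (List.mem_cons_of_mem _ h'')))
            have hyne : y ≠ x := fun he => hnotin (List.mem_append.mpr (Or.inr (he ▸ h'')))
            omega
    · rw [if_neg hcond]
      constructor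
      · -- x still occurs in the new values
        by_cases hxs : x ∈ l1.map Prod.snd ++ l2.map Prod.snd
        · rw [hV']
          rcases List.mem_append.mp hxs with h' | h'
          · exact List.mem_append.mpr (Or.inl h')
          · exact List.mem_append.mpr (Or.inr (List.mem_cons_of_mem _ h'))
        · -- then x = v and the count after the decrement cannot be 0
          have hxv' : x = v := by
            rw [hV] at hx
            rcases List.mem_append.mp hx with h' | h'
            · exact absurd (List.mem_append.mpr (Or.inl h')) hxs
            · rcases List.mem_cons.mp h' with h'' | h''
              · exact h''
              · exact absurd (List.mem_append.mpr (Or.inr h'')) hxs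
          exfalso
          apply hcond
          subst hxv'
          refine ⟨rfl, ?_⟩
          have hcnt0 : (l1.map Prod.snd ++ (x - 1) :: l2.map Prod.snd).count x = 0 := by
            rw [List.count_eq_zero]
            intro hmem
            rcases List.mem_append.mp hmem with h' | h'
            · exact hxs (List.mem_append.mpr (Or.inl h'))
            · rcases List.mem_cons.mp h' with h'' | h''
              · omega
              · exact hxs (List.mem_append.mpr (Or.inr h''))
          rw [hcv]; exact_mod_cast hcnt0
      · intro y hy
        rw [hV'] at hy
        rcases List.mem_append.mp hy with h' | h'
        · exact hb y (by rw [hV]; exact List.mem_append.mpr (Or.inl h'))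
        · rcases List.mem_cons.mp h' with h'' | h''
          · omega
          · exact hb y (by rw [hV]; exact List.mem_append.mpr (Or.inr (List.mem_cons_of_mem _ h'')))

-- the loop guard: A's findMax rescan equals B's maintained (clamped) maximum
lemma pv_guard_eq (d : PySem.Dict String Int) (m : Option Int) (hm : pvIsMax d.values m) :
    pvFindMax d = pvClamp m := by
  unfold pvFindMax
  have hfold : d.items.foldl (fun highest kv => if kv.2 > highest then kv.2 else highest) (-1)
      = d.values.foldl (fun h v => if v > h then v else h) (-1) := by
    simp [PySem.Dict.values, List.foldl_map]
  rw [hfold]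
  cases m with
  | none =>
    simp only [pvIsMax] at hm
    rw [hm]; rfl
  | some x =>
    obtain ⟨hx, hb⟩ := hm
    rw [pv_foldl_max_eq d.values (-1) x hx hb]; rfl

lemma pv_go_eq (fuel : Nat) : ∀ (s : String) (start end_ : Int) (d : PySem.Dict String Int)
    (m : Option Int) (cnt : PySem.Dict Int Int),
    d.keys.Nodup → pvIsMax d.values m → pvCntOk d.values cnt →
    pvGoA fuel s start end_ d = pvGoB fuel s start end_ d m cnt := by
  induction fuel with
  | zero => intros; rfl
  | succ fuel ih =>
    intro s start end_ d m cnt hnd hm hc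
    rw [pvGoA, pvGoB]
    rw [pv_guard_eq d m hm]
    by_cases hguard : PySem.Int.floordiv (end_ - start + 1) 2 ≤ pvClamp m
    · rw [if_pos hguard, if_pos hguard]
    · rw [if_neg hguard, if_neg hguard]
      cases he : PySem.Str.pyGet? s end_ with
      | none => rfl
      | some ce =>
        dsimp only
        cases hge : d.get? (String.ofList [ce]) with
        | none => rfl
        | some ve =>
          dsimp only
          cases hs : PySem.Str.pyGet? s start with
          | none => rfl
          | some cs =>
            dsimp only
            cases hgs : d.get? (String.ofList [cs]) with
            | none => rfl
            | some vs =>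
              dsimp only
              by_cases hlt : ve < vs
              · simp only [if_pos hlt]
                obtain ⟨h1, h2, h3⟩ := pv_step_inv d (String.ofList [ce]) ve m cnt hnd hm hc hge
                exact ih s start (end_ - 1) _ _ _ h1 h3 h2
              · simp only [if_neg hlt]
                obtain ⟨h1, h2, h3⟩ := pv_step_inv d (String.ofList [cs]) vs m cnt hnd hm hc hgs
                exact ih s (start + 1) end_ _ _ _ h1 h3 h2

-- ===== VERDICT (by name: the statement is the Claim_ definition above) =====
theorem checkSuperior_spec : Claim_equal_checkSuperior := by
  intro s start end_ fmap _ hpre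
  unfold Spec_checkSuperior checkSuperior checkSuperior_alt
  apply pv_go_eq
  · simpa [PySem.Dict.keys] using hpre.1
  · exact pv_initMax_spec _
  · exact pv_initCnt_spec _
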